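-- pv_equiv track=rewrite | github.com/SamFrengley/thesis | geometry/picture_generate/arithmetic.py | HJ_continued_fraction
-- ===== SOURCE A (Python) =====
-- from math import gcd
--
-- def HJ_step(n, q):
--     """
--     Subprocess to computing the Hirzebruch--Jung contined fraction of a
--     rational number.
--
--     Parameters
--     ----------
--     n : int
--         A positive integer.
--     q : int
--         A positive integer 1 < `q` < `n` coprime to `n`.
--
--     Returns
--     -------
--     a : int
--         The first entry in the HJ continued fraction of `n`/`q`
--     new_n : int
--         An updated n, so that the continued fraction of `n`/`q` is given by
--         that of `new_n`/`new_q`.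
--     new_q : int
--         An updated q, so that the continued fraction of `n`/`q` is given by
--         that of `new_n`/`new_q`.
--     """
--     x = n % q
--     a = ((n - x) // q) + 1
--     new_n = q
--     new_q = q - x
--     return a, new_n, new_q
--
-- def HJ_continued_fraction(n, q):
--     """Computes the Hirzebruch--Jung continued fraction of a rational number.
--
--     Parameters
--     ----------
--     n : int
--         A positive integer
--     q : int
--         A positive integer 1 <= `q` < `n`.
--
--     Returns
--     -------
--     list
--         A list consisting of the continued fraction of the rational number
--         `n`/`q`.
--     """
--     if n <= 0 or q <= 0 or n <= q:
--         raise ValueError("n,q should be positive and q < n")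
--
--     d = gcd(n, q)
--     n = n // d
--     q = q // d
--
--     ret = []
--     done = False
--     while not done:
--         if q == 1:
--             done = True
--             ret.append(n)
--         else:
--             step = HJ_step(n, q)
--             if step[2] == 1:
--                 done = True
--                 ret += [step[0], step[1]]
--             else:
--                 ret.append(step[0])
--                 n = step[1]
--                 q = step[2]
--     return ret
-- ===== SOURCE B (Python) =====
-- from math import gcd
--
-- def _cf(n, q):
--     """Regular (floor) continued-fraction quotients of n/q via Euclid."""
--     cf = []
--     while q > 0:
--         cf.append(n // q)
--         n, q = q, n % q
--     return cf
--
-- def _expand(cf, mode):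
--     """Rewrite regular CF quotients as Hirzebruch--Jung entries.
--
--     mode 0: head a0 becomes a0+1; mode 1: head b emits (b-1) twos;
--     mode 2: head c becomes c+2; modes 1 and 2 alternate down the list."""
--     if not cf:
--         return []
--     b, rest = cf[0], cf[1:]
--     if mode == 1:
--         return [2] * (b - 1) + _expand(rest, 2)
--     return [b + (1 if mode == 0 else 2)] + _expand(rest, 1)
--
-- def HJ_continued_fraction(n, q):
--     if n <= 0 or q <= 0 or n <= q:
--         raise ValueError("n,q should be positive and q < n")
--     d = gcd(n, q)
--     cf = _cf(n // d, q // d)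
--     if len(cf) % 2 == 1:
--         # use the even-length regular CF representation [..., a-1, 1]
--         cf[-1] -= 1
--         cf.append(1)
--     return _expand(cf, 0)
-- ===== Notes on version B (the rewrite author's own statement) =====
-- stated objective: alternative
-- what changed: B computes the regular continued fraction of n/q by one floor-division Euclid pass, pads it to even length, and then rewrites its quotients combinatorially (a0+1, then alternately (b-1) twos and c+2) into the HJ entries, instead of A's ceiling-step HJ recurrence loop with its done flag and look-ahead branches.
import Mathlib
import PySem

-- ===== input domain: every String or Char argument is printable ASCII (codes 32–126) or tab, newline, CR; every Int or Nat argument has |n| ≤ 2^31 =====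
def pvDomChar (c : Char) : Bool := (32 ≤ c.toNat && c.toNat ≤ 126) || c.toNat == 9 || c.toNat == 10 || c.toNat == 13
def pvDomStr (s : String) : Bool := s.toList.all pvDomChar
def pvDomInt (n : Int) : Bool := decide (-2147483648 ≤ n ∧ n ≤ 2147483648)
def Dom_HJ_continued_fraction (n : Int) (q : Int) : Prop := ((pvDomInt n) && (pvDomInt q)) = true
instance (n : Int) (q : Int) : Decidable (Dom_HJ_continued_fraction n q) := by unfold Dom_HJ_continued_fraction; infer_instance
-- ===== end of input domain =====

-- B computes the HJ expansion by a different algorithm: one floor-division Euclid pass producing the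
-- regular continued fraction, then a combinatorial rewrite of its quotients (a0+1, then alternately
-- (b-1) twos and c+2), instead of A's ceiling-step loop; objective: alternative (same cost).

-- ===== PORT A =====
def HJ_step (n : Int) (q : Int) : Int × Int × Int :=
  let x := PySem.Int.mod n q
  let a := PySem.Int.floordiv (n - x) q + 1
  (a, q, q - x)

-- A's `while not done` loop; the fuel only makes it total (inside Pre_ it never runs out)
def HJ_loopA : Nat → Int → Int → List Int → List Int
  | 0, _, _, ret => ret
  | f+1, n, q, ret =>
    if q = 1 then ret ++ [n]
    else
      let step := HJ_step n q
      if step.2.2 = 1 then ret ++ [step.1, step.2.1]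
      else HJ_loopA f step.2.1 step.2.2 (ret ++ [step.1])

def HJ_continued_fraction (n : Int) (q : Int) : List Int :=
  if n ≤ 0 ∨ q ≤ 0 ∨ n ≤ q then []   -- Python raises ValueError here; excluded by Pre_
  else
    let d : Int := Int.gcd n q
    let n' := PySem.Int.floordiv n d
    let q' := PySem.Int.floordiv q d
    HJ_loopA q'.toNat n' q' []

-- ===== PORT B =====
-- B's `while q > 0` Euclid loop (_cf), as the obvious structural recursion on q
def HJ_cf (n : Int) (q : Int) : List Int :=
  if h : 0 < q then PySem.Int.floordiv n q :: HJ_cf q (PySem.Int.mod n q) else []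
termination_by q.toNat
decreasing_by
  have h1 := PySem.Int.mod_nonneg n h
  have h2 := PySem.Int.mod_lt n h
  omega

-- B's `cf[-1] -= 1; cf.append(1)` (replace the last entry a by a-1, 1), ported by hand (exact)
def decLastApp : List Int → List Int
  | [] => [1]
  | [a] => [a - 1, 1]
  | a :: b :: l => a :: decLastApp (b :: l)

-- B's recursive _expand
def HJ_expand : List Int → Int → List Int
  | [], _ => []
  | b :: rest, mode =>
    if mode = 1 then List.replicate (b - 1).toNat 2 ++ HJ_expand rest 2
    else (b + (if mode = 0 then 1 else 2)) :: HJ_expand rest 1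

def HJ_continued_fraction_alt (n : Int) (q : Int) : List Int :=
  if n ≤ 0 ∨ q ≤ 0 ∨ n ≤ q then []   -- Python raises ValueError here; excluded by Pre_
  else
    let d : Int := Int.gcd n q
    let cf := HJ_cf (PySem.Int.floordiv n d) (PySem.Int.floordiv q d)
    let cf2 := if cf.length % 2 = 1 then decLastApp cf else cf
    HJ_expand cf2 0

-- ===== PRECONDITION & SPEC =====
-- Pre_ excludes exactly the inputs on which A raises ValueError (n ≤ 0, q ≤ 0 or n ≤ q).
def Pre_HJ_continued_fraction (n : Int) (q : Int) : Prop := 0 < q ∧ q < n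
instance (n : Int) (q : Int) : Decidable (Pre_HJ_continued_fraction n q) := by unfold Pre_HJ_continued_fraction; infer_instance
def pvWitness_HJ_continued_fraction : Int × Int := (7, 3)

def Spec_HJ_continued_fraction (n : Int) (q : Int) (out : List Int) : Prop := out = HJ_continued_fraction_alt n q
instance (n : Int) (q : Int) (out : List Int) : Decidable (Spec_HJ_continued_fraction n q out) := by unfold Spec_HJ_continued_fraction; infer_instance

-- ===== CLAIM (what is proved, stated in full; the proofs are below) =====
def Claim_equal_HJ_continued_fraction : Prop := ∀ (n : Int) (q : Int), Dom_HJ_continued_fraction n q → Pre_HJ_continued_fraction n q → Spec_HJ_continued_fraction n q (HJ_continued_fraction n q)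

-- ===== LEMMAS AND PROOFS =====

-- Reference: the HJ list by its defining ceiling recurrence (both ports are proved equal to it)
def Href (n : Int) (q : Int) : List Int :=
  if q = 1 then [n]
  else if h : 1 < q ∧ n % q ≠ 0 then (n / q + 1) :: Href q (q - n % q) else []
termination_by q.toNat
decreasing_by
  have h1 := Int.emod_nonneg n (by omega : q ≠ 0)
  have h2 := Int.emod_lt_of_pos n (by omega : (0:Int) < q)
  omega

-- parity fixes of the quotient list, as named functions for the induction
def evenFix (l : List Int) : List Int := if l.length % 2 = 1 then decLastApp l else l
def oddFix (l : List Int) : List Int := if l.length % 2 = 0 then decLastApp l else l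

lemma decLastApp_cons (b x : Int) (xs : List Int) :
    decLastApp (b :: x :: xs) = b :: decLastApp (x :: xs) := rfl

lemma evenFix_cons (b x : Int) (xs : List Int) :
    evenFix (b :: x :: xs) = b :: oddFix (x :: xs) := by
  rcases Nat.mod_two_eq_zero_or_one xs.length with h | h
  · rw [evenFix, oddFix, if_neg (by simp only [List.length_cons]; omega),
        if_neg (by simp only [List.length_cons]; omega)]
  · rw [evenFix, oddFix, if_pos (by simp only [List.length_cons]; omega),
        if_pos (by simp only [List.length_cons]; omega), decLastApp_cons]

lemma oddFix_cons (b x : Int) (xs : List Int) :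
    oddFix (b :: x :: xs) = b :: evenFix (x :: xs) := by
  rcases Nat.mod_two_eq_zero_or_one xs.length with h | h
  · rw [oddFix, evenFix, if_pos (by simp only [List.length_cons]; omega),
        if_pos (by simp only [List.length_cons]; omega), decLastApp_cons]
  · rw [oddFix, evenFix, if_neg (by simp only [List.length_cons]; omega),
        if_neg (by simp only [List.length_cons]; omega)]

lemma cf_pos (n q : Int) (h : 0 < q) : HJ_cf n q = n / q :: HJ_cf q (n % q) := by
  rw [HJ_cf, dif_pos h, PySem.Int.floordiv_eq_ediv_of_pos h, PySem.Int.mod_eq_emod_of_pos h]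

lemma cf_one (n : Int) : HJ_cf n 1 = [n] := by
  rw [cf_pos n 1 Int.one_pos, HJ_cf]
  simp

-- Href q (q-1) is q-1 twos
lemma twosBase : ∀ (k : Nat) (q : Int), q.toNat ≤ k → 2 ≤ q →
    Href q (q - 1) = List.replicate (q - 1).toNat 2 := by
  intro k
  induction k with
  | zero => intro q hk hq; omega
  | succ k ih =>
    intro q hk hq
    by_cases h2 : q = 2
    · subst h2; rw [Href]; norm_num
    · have h3 : 3 ≤ q := by omega
      have hm : q % (q - 1) = 1 := by
        calc q % (q - 1) = (1 + (q - 1) * 1) % (q - 1) := by congr 1; ring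
          _ = 1 % (q - 1) := by rw [Int.add_mul_emod_self_left]
          _ = 1 := Int.emod_eq_of_lt (by norm_num) (by omega)
      have hd : q / (q - 1) = 1 := by
        have he := Int.emod_def q (q - 1)
        rw [hm] at he
        have : (q - 1) * (q / (q - 1)) = (q - 1) * 1 := by linarith
        exact mul_left_cancel₀ (by omega) this
      rw [Href, if_neg (by omega), dif_pos ⟨by omega, by rw [hm]; omega⟩, hm, hd,
          ih (q - 1) (by omega) (by omega)]
      rw [show (q - 1).toNat = (q - 1 - 1).toNat + 1 by omega, List.replicate_succ]
      norm_num

-- peeling the chain of twos produced by a quotient b0 = k+1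
lemma twosChain : ∀ (k : Nat) (r s : Int), 1 ≤ r → 1 ≤ s →
    Href (((k : Int) + 1) * r + s) ((k : Int) * r + s) = List.replicate k 2 ++ Href (r + s) s := by
  intro k
  induction k with
  | zero => intro r s hr hs; norm_num
  | succ k ih =>
    intro r s hr hs
    have hk0 : (0:Int) ≤ (k : Int) := Int.natCast_nonneg k
    have hq2 : 2 ≤ ((k : Int) + 1) * r + s := by nlinarith
    have hrq : r < ((k : Int) + 1) * r + s := by nlinarith
    have hm : (((k : Int) + 1 + 1) * r + s) % (((k : Int) + 1) * r + s) = r := by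
      calc (((k : Int) + 1 + 1) * r + s) % (((k : Int) + 1) * r + s)
          = (r + (((k : Int) + 1) * r + s) * 1) % (((k : Int) + 1) * r + s) := by congr 1; ring
        _ = r % (((k : Int) + 1) * r + s) := by rw [Int.add_mul_emod_self_left]
        _ = r := Int.emod_eq_of_lt (by omega) hrq
    have hd : (((k : Int) + 1 + 1) * r + s) / (((k : Int) + 1) * r + s) = 1 := by
      have he := Int.emod_def (((k : Int) + 1 + 1) * r + s) (((k : Int) + 1) * r + s)
      rw [hm] at he
      have : (((k : Int) + 1) * r + s) * ((((k : Int) + 1 + 1) * r + s) / (((k : Int) + 1) * r + s))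
           = (((k : Int) + 1) * r + s) * 1 := by linarith
      exact mul_left_cancel₀ (by omega) this
    push_cast
    rw [Href, if_neg (by omega), dif_pos ⟨by omega, by rw [hm]; omega⟩, hm, hd,
        show ((k : Int) + 1) * r + s - r = (k : Int) * r + s from by ring,
        ih r s hr hs, List.replicate_succ]
    norm_num

-- the mutual step: modes 1 and 2 of the expansion vs the ceiling recurrence
lemma P12 : ∀ (k : Nat) (q r : Int), q.toNat ≤ k → 0 < r → r < q → Int.gcd q r = 1 →
    HJ_expand (oddFix (HJ_cf q r)) 1 = Href q (q - r) ∧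
    HJ_expand (evenFix (HJ_cf q r)) 2 = Href (q + r) r := by
  intro k
  induction k with
  | zero => intro q r hk hr hrq _; omega
  | succ k ih =>
    intro q r hk hr hrq hg
    by_cases hr1 : r = 1
    · subst hr1
      rw [cf_one]
      constructor
      · simp only [oddFix, List.length_cons, List.length_nil]
        rw [if_neg (by omega)]
        simp only [HJ_expand, List.append_nil]
        exact (twosBase q.toNat q le_rfl (by omega)).symm
      · have h1 : evenFix [q] = [q - 1, 1] := by norm_num [evenFix, decLastApp]
        have h2 : HJ_expand [q - 1, 1] 2 = [q + 1] := by
          simp only [HJ_expand]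
          norm_num
          omega
        rw [h1, h2, Href]
        norm_num
    · have hr2 : 2 ≤ r := by omega
      set s : Int := q % r with hsdef
      have hs0 : 0 ≤ s := Int.emod_nonneg q (by omega)
      have hsr : s < r := Int.emod_lt_of_pos q (by omega)
      have hs1 : 1 ≤ s := by
        rcases lt_or_eq_of_le hs0 with h | h
        · omega
        · exfalso
          have hdvd : r ∣ q := Int.dvd_of_emod_eq_zero h.symm
          have h2 : r.natAbs ∣ Int.gcd q r := Nat.dvd_gcd (Int.natAbs_dvd_natAbs.mpr hdvd) dvd_rfl
          rw [hg] at h2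
          have := Nat.le_of_dvd (by norm_num) h2
          omega
      have hg' : Int.gcd r s = 1 := by
        rw [hsdef, Int.emod_def, show q - r * (q / r) = q + r * (-(q / r)) from by ring,
            Int.gcd_add_mul_left_right, Int.gcd_comm]
        exact hg
      have hexp : HJ_cf q r = q / r :: HJ_cf r s := cf_pos q r (by omega)
      have hne : HJ_cf r s = r / s :: HJ_cf s (r % s) := cf_pos r s (by omega)
      have ihrs := ih r s (by omega) (by omega) hsr hg'
      have hb1 : 1 ≤ q / r := by
        have h := Int.ediv_le_ediv (show (0:Int) < r by omega) (le_of_lt hrq)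
        rwa [Int.ediv_self (by omega : r ≠ 0)] at h
      have hqrs : q = q / r * r + s := by rw [hsdef, Int.emod_def]; ring
      constructor
      · rw [hexp, hne, oddFix_cons, ← hne]
        simp only [HJ_expand]
        rw [ihrs.2]
        have hk0 : ((q / r - 1).toNat : Int) = q / r - 1 := by omega
        have htc := twosChain (q / r - 1).toNat r s (by omega) hs1
        rw [hk0] at htc
        have e1 : (q / r - 1) * r + s = q - r := by linear_combination -hqrs
        have e2 : (q / r - 1 + 1) * r + s = q := by linear_combination -hqrs
        rw [e1, e2] at htc
        exact htc.symm
      · rw [hexp, hne, evenFix_cons, ← hne]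
        simp only [HJ_expand, if_neg (by norm_num : ¬ (2:Int) = 1), if_neg (by norm_num : ¬ (2:Int) = 0)]
        rw [ihrs.1]
        have hm : (q + r) % r = s := by
          rw [show q + r = q + r * 1 from by ring, Int.add_mul_emod_self_left, hsdef]
        have hd : (q + r) / r = q / r + 1 := by
          rw [show q + r = q + 1 * r from by ring, Int.add_mul_ediv_right _ _ (by omega : r ≠ 0)]
        conv_rhs => rw [Href]
        rw [if_neg (by omega), dif_pos ⟨by omega, by rw [hm]; omega⟩, hm, hd]
        ring_nf

-- mode 0: B's full pipeline equals the ceiling recurrence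
lemma B_eq_Href (n q : Int) (hq : 0 < q) (hn : q < n) (hg : Int.gcd n q = 1) :
    HJ_expand (evenFix (HJ_cf n q)) 0 = Href n q := by
  by_cases hq1 : q = 1
  · subst hq1
    rw [cf_one]
    have h1 : evenFix [n] = [n - 1, 1] := by norm_num [evenFix, decLastApp]
    have h2 : HJ_expand [n - 1, 1] 0 = [n] := by
      simp only [HJ_expand]
      norm_num
    rw [h1, h2, Href]
    norm_num
  · set r : Int := n % q with hrdef
    have hr0 : 0 ≤ r := Int.emod_nonneg n (by omega)
    have hrq : r < q := Int.emod_lt_of_pos n (by omega)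
    have hr1 : 1 ≤ r := by
      rcases lt_or_eq_of_le hr0 with h | h
      · omega
      · exfalso
        have hdvd : q ∣ n := Int.dvd_of_emod_eq_zero h.symm
        have h2 : q.natAbs ∣ Int.gcd n q := Nat.dvd_gcd (Int.natAbs_dvd_natAbs.mpr hdvd) dvd_rfl
        rw [hg] at h2
        have := Nat.le_of_dvd (by norm_num) h2
        omega
    have hg' : Int.gcd q r = 1 := by
      rw [hrdef, Int.emod_def, show n - q * (n / q) = n + q * (-(n / q)) from by ring,
          Int.gcd_add_mul_left_right, Int.gcd_comm]
      exact hg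
    have hexp : HJ_cf n q = n / q :: HJ_cf q r := cf_pos n q (by omega)
    have hne : HJ_cf q r = q / r :: HJ_cf r (q % r) := cf_pos q r (by omega)
    rw [hexp, hne, evenFix_cons, ← hne]
    simp only [HJ_expand, if_neg (by norm_num : ¬ (0:Int) = 1)]
    rw [(P12 q.toNat q r le_rfl (by omega) hrq hg').1]
    conv_rhs => rw [Href]
    rw [if_neg hq1, dif_pos ⟨by omega, by rw [← hrdef]; omega⟩, ← hrdef]
    norm_num

-- A's loop equals the ceiling recurrence
lemma loopA_eq_Href : ∀ (k : Nat) (n q : Int) (ret : List Int) (fa : Nat),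
    0 < q → q < n → Int.gcd n q = 1 → q.toNat ≤ k → q.toNat ≤ fa →
    HJ_loopA fa n q ret = ret ++ Href n q := by
  intro k
  induction k with
  | zero => intro n q ret fa hq _ _ hk _; omega
  | succ k ih =>
    intro n q ret fa hq hn hg hk hfa
    obtain ⟨fa', rfl⟩ : ∃ f, fa = f + 1 := ⟨fa - 1, by omega⟩
    by_cases h1 : q = 1
    · subst h1
      simp only [HJ_loopA]
      rw [Href]
      norm_num
    · have hq2 : 2 ≤ q := by omega
      have hx0 : n % q ≠ 0 := by
        intro h
        have hdvd : q ∣ n := Int.dvd_of_emod_eq_zero h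
        have h2 : q.natAbs ∣ Int.gcd n q := Nat.dvd_gcd (Int.natAbs_dvd_natAbs.mpr hdvd) dvd_rfl
        rw [hg] at h2
        have := Nat.le_of_dvd (by norm_num) h2
        omega
      have hxl : 0 < n % q := lt_of_le_of_ne (Int.emod_nonneg n (by omega)) (Ne.symm hx0)
      have hxu : n % q < q := Int.emod_lt_of_pos n (by omega)
      have hstep : HJ_step n q = (n / q + 1, q, q - n % q) := by
        simp only [HJ_step, PySem.Int.mod_eq_emod_of_pos (show (0:Int) < q by omega),
          PySem.Int.floordiv_eq_ediv_of_pos (show (0:Int) < q by omega)]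
        rw [show n - n % q = q * (n / q) from by rw [Int.emod_def]; ring,
            Int.mul_ediv_cancel_left _ (show q ≠ 0 by omega)]
      have hg' : Int.gcd q (q - n % q) = 1 := by
        have hcop : IsCoprime (n : ℤ) q := Int.isCoprime_iff_gcd_eq_one.mpr hg
        rw [← Int.isCoprime_iff_gcd_eq_one,
            show q - n % q = -n + q * (n / q + 1) by rw [Int.emod_def]; ring]
        exact (hcop.symm.neg_right).add_mul_left_right _
      by_cases hlast : q - n % q = 1
      · simp only [HJ_loopA, if_neg h1, hstep, hlast]
        rw [Href, if_neg h1, dif_pos ⟨by omega, hx0⟩, hlast, Href]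
        norm_num
      · simp only [HJ_loopA, if_neg h1, hstep, if_neg hlast]
        rw [ih q (q - n % q) (ret ++ [n / q + 1]) fa' (by omega) (by omega) hg' (by omega) (by omega)]
        conv_rhs => rw [Href]
        rw [if_neg h1, dif_pos ⟨by omega, hx0⟩]
        simp

-- ===== VERDICT (by name: the statement is the Claim_ definition above) =====
theorem HJ_continued_fraction_spec : Claim_equal_HJ_continued_fraction := by
  intro n q _ hpre
  obtain ⟨hq, hn⟩ := hpre
  unfold Spec_HJ_continued_fraction HJ_continued_fraction HJ_continued_fraction_alt
  rw [if_neg (by omega), if_neg (by omega)]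
  have hg0 : 0 < Int.gcd n q := Int.gcd_pos_iff.mpr (Or.inl (by omega))
  set d : Int := (Int.gcd n q : Int) with hd
  have hd0 : (0:Int) < d := by rw [hd]; exact_mod_cast hg0
  obtain ⟨n1, hn1⟩ : d ∣ n := hd ▸ Int.gcd_dvd_left n q
  obtain ⟨q1, hq1⟩ : d ∣ q := hd ▸ Int.gcd_dvd_right n q
  have hen : n / d = n1 := by rw [hn1, Int.mul_ediv_cancel_left _ (by omega)]
  have heq : q / d = q1 := by rw [hq1, Int.mul_ediv_cancel_left _ (by omega)]
  have hfn : PySem.Int.floordiv n d = n1 := by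
    rw [PySem.Int.floordiv_eq_ediv_of_pos hd0, hen]
  have hfq : PySem.Int.floordiv q d = q1 := by
    rw [PySem.Int.floordiv_eq_ediv_of_pos hd0, heq]
  have hq1pos : 0 < q1 := by
    by_contra h
    push Not at h
    have h2 : d * q1 ≤ 0 := by nlinarith
    rw [hq1] at hq; linarith
  have hq1n1 : q1 < n1 := by
    by_contra h
    push Not at h
    have h2 : d * n1 ≤ d * q1 := by nlinarith
    rw [hn1] at hn; rw [hq1] at hn; linarith
  have hgcd1 : Int.gcd n1 q1 = 1 := by
    have h3 := Int.gcd_div_gcd_div_gcd hg0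
    rw [← hd] at h3
    rwa [hen, heq] at h3
  simp only [hfn, hfq]
  rw [loopA_eq_Href q1.toNat n1 q1 [] q1.toNat hq1pos hq1n1 hgcd1 le_rfl le_rfl,
      List.nil_append, ← B_eq_Href n1 q1 hq1pos hq1n1 hgcd1]
  rfl
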